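-- pv_equiv track=rewrite | github.com/Fnadona/hackerHankExercises | SumVsXOR.py | sumXor
-- ===== SOURCE A (Python) =====
-- def sumXor(n):
-- 	zeros = 0
--
-- 	if(n == 0 or n == 1):
-- 		return 1
--
-- 	while(n>1):
-- 		if(n % 2 == 0):
-- 			zeros = zeros + 1
--
-- 		n = n // 2
--
-- 	return 2**zeros
-- ===== SOURCE B (Python) =====
-- def sumXor(n):
--     # closed form: the answer is two to the number of zero bits of n; inputs at most one (incl. negatives) give one, as in A
--     if n <= 1:
--         return 1
--     return 2 ** (n.bit_length() - n.bit_count())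
-- ===== Notes on version B (the rewrite author's own statement) =====
-- stated objective: idiomatic
-- what changed: Replaces the bit-stripping while-loop with a closed form two raised to (bit_length minus bit_count), using Python's integer bit builtins.
import Mathlib
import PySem

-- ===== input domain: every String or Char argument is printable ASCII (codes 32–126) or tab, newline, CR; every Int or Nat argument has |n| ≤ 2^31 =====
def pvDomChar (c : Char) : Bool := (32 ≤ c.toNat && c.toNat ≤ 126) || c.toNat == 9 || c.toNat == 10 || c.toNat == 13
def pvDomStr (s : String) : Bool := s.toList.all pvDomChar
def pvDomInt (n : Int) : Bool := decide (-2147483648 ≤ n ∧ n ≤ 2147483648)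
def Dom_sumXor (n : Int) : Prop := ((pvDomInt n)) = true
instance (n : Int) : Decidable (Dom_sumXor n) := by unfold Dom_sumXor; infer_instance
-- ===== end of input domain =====

-- B replaces A's bit-stripping while-loop by the closed form two^(bit_length minus bit_count) (idiomatic; same values).


-- ===== PORT A =====
-- termination helper for the while-loop (n = n // 2 strictly shrinks n.toNat while n > 1)
theorem sumXorLoop_dec (n : Int) (h : 1 < n) :
    (PySem.Int.floordiv n 2).toNat < n.toNat := by
  rw [PySem.Int.floordiv_eq_ediv_of_pos (by omega : (0:Int) < 2)]
  omega

-- while(n>1): if n % 2 == 0: zeros += 1; n = n // 2; then return 2**zeros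
def sumXorLoop (n : Int) (zeros : Nat) : Int :=
  if h : 1 < n then
    sumXorLoop (PySem.Int.floordiv n 2)
      (if PySem.Int.mod n 2 = 0 then zeros + 1 else zeros)
  else
    (2 : Int) ^ zeros
termination_by n.toNat
decreasing_by exact sumXorLoop_dec n h

def sumXor (n : Int) : Int :=
  if n = 0 ∨ n = 1 then 1 else sumXorLoop n 0

-- ===== PORT B =====
def sumXor_alt (n : Int) : Int :=
  if n ≤ 1 then 1
  else (2 : Int) ^ (PySem.Int.bitLength n - PySem.Int.bitCount n)

-- ===== PRECONDITION & SPEC =====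
def Spec_sumXor (n : Int) (out : Int) : Prop := out = sumXor_alt n
instance (n : Int) (out : Int) : Decidable (Spec_sumXor n out) := by unfold Spec_sumXor; infer_instance

-- ===== CLAIM (what is proved, stated in full; the proofs are below) =====
def Claim_equal_sumXor : Prop := ∀ (n : Int), Dom_sumXor n → Spec_sumXor n (sumXor n)

-- ===== LEMMAS AND PROOFS =====
theorem sumXorLoop_closed (m : Nat) : ∀ (n : Int), n.toNat = m → 1 ≤ n → ∀ (z : Nat),
    sumXorLoop n z = (2 : Int) ^ (z + (PySem.Int.bitLength n - PySem.Int.bitCount n)) := by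
  induction m using Nat.strong_induction_on with
  | _ m ih =>
    intro n hm h1 z
    rw [sumXorLoop]
    by_cases h : 1 < n
    · simp only [h, dif_pos]
      have hdec := sumXorLoop_dec n h
      have hq : (1:Int) ≤ PySem.Int.floordiv n 2 := by
        rw [PySem.Int.floordiv_eq_ediv_of_pos (by omega : (0:Int) < 2)]; omega
      rw [ih _ (hm ▸ hdec) _ rfl hq]
      congr 1
      have hbl := PySem.Int.bitLength_of_pos (n := n) (by omega)
      have hbc := PySem.Int.bitCount_of_pos (n := n) (by omega)
      have hle : PySem.Int.bitCount (PySem.Int.floordiv n 2) ≤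
          PySem.Int.bitLength (PySem.Int.floordiv n 2) :=
        PySem.Int.bitCount_le_bitLength _
      have hmod : PySem.Int.mod n 2 = n % 2 :=
        PySem.Int.mod_eq_emod_of_pos (by omega)
      by_cases hz : PySem.Int.mod n 2 = 0
      · have : (PySem.Int.mod n 2).toNat = 0 := by rw [hz]; rfl
        simp only [hz, if_pos]
        omega
      · have h2 : n % 2 = 1 := by omega
        have : (PySem.Int.mod n 2).toNat = 1 := by rw [hmod, h2]; rfl
        simp only [hz, if_neg, not_false_iff]
        omega
    · simp only [h, dif_neg, not_false_iff]
      have hn1 : n = 1 := by omega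
      subst hn1
      norm_num [show PySem.Int.bitLength (1:Int) = 1 from by decide,
        show PySem.Int.bitCount (1:Int) = 1 from by decide]

-- ===== VERDICT (by name: the statement is the Claim_ definition above) =====
theorem sumXor_spec : Claim_equal_sumXor := by
  intro n _
  unfold Spec_sumXor sumXor sumXor_alt
  by_cases h01 : n = 0 ∨ n = 1
  · simp only [h01, if_pos]
    have : n ≤ 1 := by omega
    simp [this]
  · simp only [h01, if_neg, not_false_iff]
    by_cases hle : n ≤ 1
    · -- n ≤ 1, n ∉ {0,1}: n ≤ -1; the loop body never runs and 2^0 = 1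
      rw [sumXorLoop]
      have : ¬ 1 < n := by omega
      simp [this, hle]
    · have h1 : 1 ≤ n := by omega
      rw [sumXorLoop_closed n.toNat n rfl h1 0]
      simp [hle]
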